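-- pv_equiv track=rewrite | github.com/janelia-flyem/neuclease | neuclease/misc/neuroglancer/annotations/precomputed/_util.py | _geometry_cols
-- ===== SOURCE A (Python) =====
-- def _geometry_cols(coord_names, annotation_type):
--     """
--     Determine the list of column groups that express
--     the geometry of annotations of the given type.
--     Point annotations have only one group,
--     but other annotation types have two.
--
--     Examples:
--
--         >>> _geometry_cols([*'xyz'], 'point')
--         [['x', 'y', 'z']]
--
--         >>> _geometry_cols([*'xyz'], 'ellipsoid')
--         [['x', 'y', 'z'], ['rx', 'ry', 'rz']]
--
--         >>> _geometry_cols([*'xyz'], 'line')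
--         [['xa', 'ya', 'za'], ['xb', 'yb', 'zb']]
--
--         >>> _geometry_cols([*'xyz'], 'axis_aligned_bounding_box')
--         [['xa', 'ya', 'za'], ['xb', 'yb', 'zb']]
--     """
--     if annotation_type == 'point':
--         return [[c for c in coord_names]]
--
--     if annotation_type == 'ellipsoid':
--         return [
--             [c for c in coord_names],
--             [f'r{c}' for c in coord_names]
--         ]
--
--     if annotation_type in ('line', 'axis_aligned_bounding_box'):
--         return [
--             [f'{c}a' for c in coord_names],
--             [f'{c}b' for c in coord_names]
--         ]
--
--     raise ValueError(f"Annotation type {annotation_type} not supported")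
-- ===== SOURCE B (Python) =====
-- def _geometry_cols(coord_names, annotation_type):
--     # Decoration-matrix approach: for every coordinate, precompute ALL four
--     # possible decorated names (plain, r-prefixed, a-suffixed, b-suffixed) as
--     # one row, then the answer is just a column selection (a transpose of the
--     # chosen columns), driven by the per-type column indices.
--     indices = {
--         'point': (0,),
--         'ellipsoid': (0, 1),
--         'line': (2, 3),
--         'axis_aligned_bounding_box': (2, 3),
--     }.get(annotation_type)
--     if indices is None:
--         raise ValueError(f"Annotation type {annotation_type} not supported")
--     table = [(c, f'r{c}', f'{c}a', f'{c}b') for c in coord_names]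
--     return [[row[i] for row in table] for i in indices]
-- ===== Notes on version B (the rewrite author's own statement) =====
-- stated objective: alternative
-- what changed: Instead of A's per-type branch each building its groups with its own comprehensions, B precomputes one decoration matrix with all four possible decorated names per coordinate and then transposes/selects the per-type column indices; unknown types raise the identical ValueError (excluded by Pre_).
import Mathlib
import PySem

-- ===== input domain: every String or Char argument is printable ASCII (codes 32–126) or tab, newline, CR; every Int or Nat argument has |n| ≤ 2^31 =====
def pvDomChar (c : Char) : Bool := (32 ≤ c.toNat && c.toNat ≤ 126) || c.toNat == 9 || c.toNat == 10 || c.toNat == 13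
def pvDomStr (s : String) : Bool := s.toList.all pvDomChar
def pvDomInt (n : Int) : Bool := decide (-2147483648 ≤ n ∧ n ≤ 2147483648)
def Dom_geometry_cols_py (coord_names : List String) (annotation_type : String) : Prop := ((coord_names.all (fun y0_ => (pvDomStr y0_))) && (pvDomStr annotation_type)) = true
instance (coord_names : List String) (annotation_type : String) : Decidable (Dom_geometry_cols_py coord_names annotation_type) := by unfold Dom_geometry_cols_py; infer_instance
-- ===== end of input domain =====

-- B selects columns of a precomputed decoration matrix instead of A's per-type branch comprehensions; equivalence is on the return value (unknown types, where both raise ValueError, are excluded by Pre_).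

-- ===== PORT A =====
-- Transliteration of A's if-chain; the final `raise ValueError` branch is excluded by Pre_ (port returns []).
def geometry_cols_py (coord_names : List String) (annotation_type : String) : List (List String) :=
  if annotation_type == "point" then
    [coord_names.map (fun c => c)]
  else if annotation_type == "ellipsoid" then
    [coord_names.map (fun c => c), coord_names.map (fun c => "r" ++ c)]
  else if annotation_type == "line" || annotation_type == "axis_aligned_bounding_box" then
    [coord_names.map (fun c => c ++ "a"), coord_names.map (fun c => c ++ "b")]
  else
    []  -- raise ValueError: excluded by Pre_

-- ===== PORT B =====
-- B's index table: annotation type -> column indices into the decoration rows.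
def pvIndices : List (String × List Nat) :=
  [("point", [0]),
   ("ellipsoid", [0, 1]),
   ("line", [2, 3]),
   ("axis_aligned_bounding_box", [2, 3])]

-- row[i] for a 4-tuple row; in B the index is always one of 0..3.
def pvRowGet (row : String × String × String × String) (i : Nat) : String :=
  match i with
  | 0 => row.1
  | 1 => row.2.1
  | 2 => row.2.2.1
  | _ => row.2.2.2

def geometry_cols_py_alt (coord_names : List String) (annotation_type : String) : List (List String) :=
  match pvIndices.lookup annotation_type with
  | none => []  -- raise ValueError: excluded by Pre_
  | some indices =>
      let table := coord_names.map (fun c => (c, "r" ++ c, c ++ "a", c ++ "b"))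
      indices.map (fun i => table.map (fun row => pvRowGet row i))

-- ===== PRECONDITION & SPEC =====
-- Pre_ excludes exactly the annotation types on which A raises ValueError (B raises it too).
def Pre_geometry_cols_py (coord_names : List String) (annotation_type : String) : Prop :=
  annotation_type = "point" ∨ annotation_type = "ellipsoid" ∨
    annotation_type = "line" ∨ annotation_type = "axis_aligned_bounding_box"
instance (coord_names : List String) (annotation_type : String) : Decidable (Pre_geometry_cols_py coord_names annotation_type) := by unfold Pre_geometry_cols_py; infer_instance
def pvWitness_geometry_cols_py : List String × String := (["x", "y", "z"], "ellipsoid")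
def Spec_geometry_cols_py (coord_names : List String) (annotation_type : String) (out : List (List String)) : Prop := out = geometry_cols_py_alt coord_names annotation_type
instance (coord_names : List String) (annotation_type : String) (out : List (List String)) : Decidable (Spec_geometry_cols_py coord_names annotation_type out) := by unfold Spec_geometry_cols_py; infer_instance

-- ===== CLAIM (what is proved, stated in full; the proofs are below) =====
def Claim_equal_geometry_cols_py : Prop := ∀ (coord_names : List String) (annotation_type : String), Dom_geometry_cols_py coord_names annotation_type → Pre_geometry_cols_py coord_names annotation_type → Spec_geometry_cols_py coord_names annotation_type (geometry_cols_py coord_names annotation_type)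

-- ===== LEMMAS AND PROOFS =====

-- ===== VERDICT (by name: the statement is the Claim_ definition above) =====
theorem geometry_cols_py_spec : Claim_equal_geometry_cols_py := by
  intro coord_names annotation_type _ hpre
  unfold Spec_geometry_cols_py
  rcases hpre with h | h | h | h <;> subst h <;>
    simp [geometry_cols_py, geometry_cols_py_alt, pvIndices, pvRowGet, List.lookup, List.map_map, Function.comp_def]
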